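-- pv_equiv track=rewrite | github.com/mmprotest/agentforge | src/agentforge/planner.py | _compute_depth
-- ===== SOURCE A (Python) =====
-- def _compute_depth(deps: dict[str, list[str]], errors: list[str]) -> int:
--     visiting: set[str] = set()
--     visited: dict[str, int] = {}
--
--     def visit(node: str) -> int:
--         if node in visited:
--             return visited[node]
--         if node in visiting:
--             errors.append("Task graph contains a cycle")
--             return 0
--         visiting.add(node)
--         depth = 1
--         for parent in deps.get(node, []):
--             if parent not in deps:
--                 errors.append(f"Unknown dependency: {parent}")
--                 continue
--             depth = max(depth, 1 + visit(parent))
--         visiting.remove(node)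
--         visited[node] = depth
--         return depth
--
--     return max((visit(node) for node in deps), default=0)
-- ===== SOURCE B (Python) =====
-- def _compute_depth(deps: dict[str, list[str]], errors: list[str]) -> int:
--     # Iterative explicit-stack DFS (no recursion); same return value and same
--     # error-append order as the recursive original.
--     visiting: set[str] = set()
--     visited: dict[str, int] = {}
--     best = 0
--     for start in deps:
--         if start in visited:
--             best = max(best, visited[start])
--             continue
--         visiting.add(start)
--         stack = [[start, list(deps[start]), 1]]
--         while stack:
--             frame = stack[-1]
--             node, parents = frame[0], frame[1]
--             if not parents:
--                 stack.pop()
--                 visiting.discard(node)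
--                 visited[node] = frame[2]
--                 if stack:
--                     stack[-1][2] = max(stack[-1][2], 1 + frame[2])
--                 else:
--                     best = max(best, frame[2])
--                 continue
--             parent = parents.pop(0)
--             if parent not in deps:
--                 errors.append(f"Unknown dependency: {parent}")
--             elif parent in visited:
--                 frame[2] = max(frame[2], 1 + visited[parent])
--             elif parent in visiting:
--                 errors.append("Task graph contains a cycle")
--                 frame[2] = max(frame[2], 1 + 0)
--             else:
--                 visiting.add(parent)
--                 stack.append([parent, list(deps[parent]), 1])
--     return best
-- ===== Notes on version B (the rewrite author's own statement) =====
-- stated objective: alternative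
-- what changed: The recursive memoized DFS (closure `visit` with Python-stack recursion) is replaced by an explicit-stack iterative DFS: a worklist of (node, remaining-parents, depth) frames driven by one while-loop, with the same visiting/visited maps and the same error-append order.
import Mathlib
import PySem

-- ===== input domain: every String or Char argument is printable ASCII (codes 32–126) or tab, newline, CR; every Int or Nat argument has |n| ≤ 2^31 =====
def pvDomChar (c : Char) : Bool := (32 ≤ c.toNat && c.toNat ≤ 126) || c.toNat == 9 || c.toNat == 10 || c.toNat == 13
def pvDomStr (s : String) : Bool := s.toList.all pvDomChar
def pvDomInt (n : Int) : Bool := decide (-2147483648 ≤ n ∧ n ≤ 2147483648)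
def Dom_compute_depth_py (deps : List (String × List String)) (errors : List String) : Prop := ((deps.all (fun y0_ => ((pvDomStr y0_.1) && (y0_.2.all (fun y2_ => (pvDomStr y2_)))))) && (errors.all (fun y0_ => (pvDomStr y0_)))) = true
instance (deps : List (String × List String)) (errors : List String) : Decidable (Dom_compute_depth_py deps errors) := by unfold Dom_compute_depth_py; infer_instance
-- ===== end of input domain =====

-- B replaces A's recursive memoized DFS by an explicit-stack iterative DFS (alternative
-- decomposition, same cost).  A also appends messages to `errors` in place; that append-only
-- side effect never influences the returned int, so the ports model the RETURN VALUE only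
-- (Source B performs the identical appends in the identical order).

-- ===== PORT A =====
-- state = (visiting : set[str], visited : dict[str, int])
abbrev PVSt := PySem.Set String × PySem.Dict String Int

mutual
-- `visit(node)` of A; the Nat is a fuel guard only (the port passes d.size + 1, which the
-- proofs show is never exhausted: recursion depth is bounded by the number of keys).
def visitA (d : PySem.Dict String (List String)) : Nat → String → PVSt → Option (Int × PVSt)
  | 0, _, _ => none
  | f+1, node, (vis, ved) =>
    match PySem.Dict.get? ved node with
    | some k => some (k, (vis, ved))
    | none =>
      if PySem.Set.contains vis node then
        some (0, (vis, ved))        -- errors.append("Task graph contains a cycle")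
      else
        match foldParentsA d f (PySem.Dict.getD d node []) 1 (PySem.Set.add vis node, ved) with
        | none => none
        | some (dep, (vis', ved')) =>
          -- visiting.remove(node): node is always a member here, so remove = discard
          some (dep, (PySem.Set.discard vis' node, PySem.Dict.insert ved' node dep))
termination_by f _ _ => (f, 0, 0)

-- the `for parent in deps.get(node, [])` loop of A
def foldParentsA (d : PySem.Dict String (List String)) : Nat → List String → Int → PVSt → Option (Int × PVSt)
  | _, [], dep, st => some (dep, st)
  | f, p :: ps, dep, st =>
    if PySem.Dict.contains d p = false then
      foldParentsA d f ps dep st    -- errors.append("Unknown dependency: p"); continue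
    else
      match visitA d f p st with
      | none => none
      | some (r, st') => foldParentsA d f ps (max dep (1 + r)) st'
termination_by f ps _ _ => (f, 1, ps.length)
end

def stepTopA (d : PySem.Dict String (List String)) (fuel : Nat) (acc : Int × PVSt) (node : String) : Int × PVSt :=
  match visitA d fuel node acc.2 with
  | some (r, st') => (max acc.1 r, st')
  | none => acc

def compute_depth_py (deps : List (String × List String)) (errors : List String) : Int :=
  let d := PySem.Dict.ofList deps
  ((PySem.Dict.keys d).foldl (stepTopA d (PySem.Dict.size d + 1)) (0, (PySem.Set.empty, PySem.Dict.empty))).1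

-- ===== PORT B =====
-- fuel bound for the while-loop (a totality guard only: Source B's loop needs none; the proofs
-- show this bound is never exhausted)
def fuelE (P : Nat) : Nat → Nat
  | 0 => 0
  | f+1 => P * (fuelE P f + 1) + 2

def paramP (d : PySem.Dict String (List String)) : Nat := ((PySem.Dict.values d).map List.length).sum

-- the `while stack:` loop of Source B; a frame is (node, remaining parents, depth so far)
def runB (d : PySem.Dict String (List String)) : Nat → List (String × List String × Int) → PVSt → Option (Int × PVSt)
  | 0, _, _ => none
  | _+1, [], _ => none
  | f+1, (node, ps, dep) :: rest, (vis, ved) =>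
    match ps with
    | [] =>   -- frame finished: pop, visiting.discard(node), visited[node] = depth
      match rest with
      | [] => some (dep, (PySem.Set.discard vis node, PySem.Dict.insert ved node dep))
      | (n2, ps2, d2) :: r2 =>
        runB d f ((n2, ps2, max d2 (1 + dep)) :: r2)
          (PySem.Set.discard vis node, PySem.Dict.insert ved node dep)
    | p :: ps' =>
      if PySem.Dict.contains d p = false then
        runB d f ((node, ps', dep) :: rest) (vis, ved)    -- errors.append("Unknown dependency: p")
      else
        match PySem.Dict.get? ved p with
        | some k => runB d f ((node, ps', max dep (1 + k)) :: rest) (vis, ved)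
        | none =>
          if PySem.Set.contains vis p then
            -- errors.append("Task graph contains a cycle")
            runB d f ((node, ps', max dep (1 + 0)) :: rest) (vis, ved)
          else
            runB d f ((p, PySem.Dict.getD d p [], 1) :: (node, ps', dep) :: rest)
              (PySem.Set.add vis p, ved)

def stepTopB (d : PySem.Dict String (List String)) (fuel : Nat) (acc : Int × PVSt) (node : String) : Int × PVSt :=
  match PySem.Dict.get? acc.2.2 node with
  | some k => (max acc.1 k, acc.2)
  | none =>
    match runB d fuel [(node, PySem.Dict.getD d node [], 1)] (PySem.Set.add acc.2.1 node, acc.2.2) with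
    | some (r, st') => (max acc.1 r, st')
    | none => acc

def compute_depth_py_alt (deps : List (String × List String)) (errors : List String) : Int :=
  let d := PySem.Dict.ofList deps
  ((PySem.Dict.keys d).foldl (stepTopB d (fuelE (paramP d) (PySem.Dict.size d + 1))) (0, (PySem.Set.empty, PySem.Dict.empty))).1

-- ===== PRECONDITION & SPEC =====
def Spec_compute_depth_py (deps : List (String × List String)) (errors : List String) (out : Int) : Prop := out = compute_depth_py_alt deps errors
instance (deps : List (String × List String)) (errors : List String) (out : Int) : Decidable (Spec_compute_depth_py deps errors out) := by unfold Spec_compute_depth_py; infer_instance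

-- ===== CLAIM (what is proved, stated in full; the proofs are below) =====
def Claim_equal_compute_depth_py : Prop := ∀ (deps : List (String × List String)) (errors : List String), Dom_compute_depth_py deps errors → Spec_compute_depth_py deps errors (compute_depth_py deps errors)

-- ===== LEMMAS AND PROOFS =====

-- number of keys of d not yet in the visiting set (the measure behind A's recursion depth)
def klD (d : PySem.Dict String (List String)) (vis : PySem.Set String) : Nat :=
  ((PySem.Dict.keys d).filter (fun k => !(PySem.Set.contains vis k))).length

lemma set_add_eq (vis : PySem.Set String) (x : String) (h : PySem.Set.contains vis x = false) :
    PySem.Set.add vis x = vis ++ [x] := by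
  rw [PySem.Set.add, if_neg]
  rw [show (vis.contains x) = PySem.Set.contains vis x from rfl, h]
  simp

lemma set_not_mem (vis : PySem.Set String) (x : String) (h : PySem.Set.contains vis x = false) :
    x ∉ vis := by
  intro hmem
  have h' : List.contains vis x = false := h
  have := List.contains_iff_mem.2 hmem
  rw [h'] at this
  cases this

lemma contains_single (x k : String) : List.contains [x] k = (k == x) := by
  show List.elem k [x] = _
  simp only [List.elem]
  cases k == x <;> rfl

lemma set_discard_add (vis : PySem.Set String) (x : String) (h : PySem.Set.contains vis x = false) :
    PySem.Set.discard (PySem.Set.add vis x) x = vis := by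
  rw [set_add_eq vis x h, PySem.Set.discard, List.filter_append]
  have h2 : List.filter (fun y => !y == x) [x] = [] := by simp
  rw [h2, List.append_nil, List.filter_eq_self.2]
  intro y hy
  have : y ≠ x := fun he => set_not_mem vis x h (he ▸ hy)
  simp [this]

lemma klD_add_lt (d : PySem.Dict String (List String)) (vis : PySem.Set String) (x : String)
    (hx : PySem.Dict.contains d x = true) (hnv : PySem.Set.contains vis x = false) :
    klD d (PySem.Set.add vis x) < klD d vis := by
  have hxk : x ∈ PySem.Dict.keys d := (PySem.Dict.contains_iff_mem_keys _ _).1 hx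
  unfold klD
  rw [set_add_eq vis x hnv]
  have hcong : ∀ k ∈ PySem.Dict.keys d,
      (!(PySem.Set.contains (vis ++ [x]) k)) = ((!(k == x)) && (!(PySem.Set.contains vis k))) := by
    intro k _
    show (!(List.contains (vis ++ [x]) k)) = _
    rw [List.contains_append, contains_single, Bool.not_or, Bool.and_comm]
    rfl
  rw [List.filter_congr hcong, ← List.filter_filter]
  apply List.length_filter_lt_length_iff_exists.2
  exact ⟨x, List.mem_filter.2 ⟨hxk, by rw [show (PySem.Set.contains vis x) = false from hnv]; rfl⟩, by simp⟩

lemma klD_empty (d : PySem.Dict String (List String)) : klD d PySem.Set.empty = PySem.Dict.size d := by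
  have h : ∀ k ∈ PySem.Dict.keys d, (!(PySem.Set.contains PySem.Set.empty k)) = true := by
    intro k _; rfl
  unfold klD
  rw [List.filter_congr h, List.filter_true]
  simp [PySem.Dict.keys, PySem.Dict.size]

lemma getD_len_le_paramP (d : PySem.Dict String (List String)) (k : String)
    (h : PySem.Dict.contains d k = true) : (PySem.Dict.getD d k []).length ≤ paramP d := by
  have h1 : (PySem.Dict.get? d k).isSome := by rw [← PySem.Dict.contains_eq_isSome_get? d k]; exact h
  obtain ⟨v, hv⟩ := Option.isSome_iff_exists.1 h1
  have hm : (k, v) ∈ d.items := PySem.Dict.mem_items_of_get?_eq_some d hv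
  have hvv : v ∈ PySem.Dict.values d := by
    simp only [PySem.Dict.values, List.mem_map]; exact ⟨(k, v), hm, rfl⟩
  have hmm : v.length ∈ (PySem.Dict.values d).map List.length := List.mem_map_of_mem hvv
  have := List.single_le_sum (l := (PySem.Dict.values d).map List.length) (by intro x _; omega) _ hmm
  simpa [paramP, PySem.Dict.getD_eq_get?_getD, hv] using this

-- ---- restoration: A's visit returns with `visiting` exactly as it found it ----
def RVp (d : PySem.Dict String (List String)) (f : Nat) : Prop :=
  ∀ p vis ved r vis' ved', visitA d f p (vis, ved) = some (r, (vis', ved')) → vis' = vis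

def RFp (d : PySem.Dict String (List String)) (f : Nat) : Prop :=
  ∀ ps dep vis ved dep' vis' ved', foldParentsA d f ps dep (vis, ved) = some (dep', (vis', ved')) → vis' = vis

lemma rf_of_rv (d : PySem.Dict String (List String)) (f : Nat) (h : RVp d f) : RFp d f := by
  intro ps
  induction ps with
  | nil =>
    intro dep vis ved dep' vis' ved' hfa
    rw [foldParentsA] at hfa
    cases hfa
    rfl
  | cons p ps ih =>
    intro dep vis ved dep' vis' ved' hfa
    rw [foldParentsA] at hfa
    by_cases hc : PySem.Dict.contains d p = false
    · rw [if_pos hc] at hfa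
      exact ih dep vis ved dep' vis' ved' hfa
    · rw [if_neg hc] at hfa
      cases hv : visitA d f p (vis, ved) with
      | none => rw [hv] at hfa; cases hfa
      | some out =>
        obtain ⟨r, v2, w2⟩ := out
        rw [hv] at hfa
        have hv2 : v2 = vis := h p vis ved r v2 w2 hv
        subst hv2
        exact ih _ v2 w2 dep' vis' ved' hfa

lemma rv_all (d : PySem.Dict String (List String)) : ∀ f, RVp d f := by
  intro f
  induction f with
  | zero => intro p vis ved r vis' ved' hv; rw [visitA] at hv; cases hv
  | succ f ih =>
    intro p vis ved r vis' ved' hv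
    rw [visitA] at hv
    cases hg : PySem.Dict.get? ved p with
    | some k => rw [hg] at hv; cases hv; rfl
    | none =>
      rw [hg] at hv
      by_cases hvis : PySem.Set.contains vis p = true
      · rw [if_pos hvis] at hv; cases hv; rfl
      · rw [if_neg hvis] at hv
        have hvisf : PySem.Set.contains vis p = false := by
          cases hb : PySem.Set.contains vis p
          · rfl
          · exact absurd hb hvis
        cases hfold : foldParentsA d f (PySem.Dict.getD d p []) 1 (PySem.Set.add vis p, ved) with
        | none => rw [hfold] at hv; cases hv
        | some out =>
          obtain ⟨dep, v1, w1⟩ := out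
          have hv1 : v1 = PySem.Set.add vis p :=
            rf_of_rv d f ih _ 1 (PySem.Set.add vis p) ved dep v1 w1 hfold
          rw [hfold] at hv
          cases hv
          rw [hv1]
          exact set_discard_add vis p hvisf

-- ---- totality: with fuel > klD, A's fuel guard is never reached ----
def TVp (d : PySem.Dict String (List String)) (f : Nat) : Prop :=
  ∀ p vis ved, PySem.Dict.contains d p = true → klD d vis < f → ∃ out, visitA d f p (vis, ved) = some out

def TFp (d : PySem.Dict String (List String)) (f : Nat) : Prop :=
  ∀ ps dep vis ved, klD d vis < f → ∃ out, foldParentsA d f ps dep (vis, ved) = some out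

lemma tf_of_tv (d : PySem.Dict String (List String)) (f : Nat) (h : TVp d f) : TFp d f := by
  intro ps
  induction ps with
  | nil => intro dep vis ved _; exact ⟨(dep, (vis, ved)), by rw [foldParentsA]⟩
  | cons p ps ih =>
    intro dep vis ved hkl
    by_cases hc : PySem.Dict.contains d p = false
    · obtain ⟨out, hout⟩ := ih dep vis ved hkl
      exact ⟨out, by rw [foldParentsA, if_pos hc, hout]⟩
    · have hc' : PySem.Dict.contains d p = true := by
        cases hb : PySem.Dict.contains d p
        · exact absurd hb hc
        · rfl
      obtain ⟨out, hout⟩ := h p vis ved hc' hkl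
      obtain ⟨r, v2, w2⟩ := out
      have hv2 : v2 = vis := rv_all d f p vis ved r v2 w2 hout
      subst hv2
      obtain ⟨out2, hout2⟩ := ih (max dep (1 + r)) v2 w2 hkl
      exact ⟨out2, by rw [foldParentsA, if_neg hc, hout]; exact hout2⟩

lemma tv_all (d : PySem.Dict String (List String)) : ∀ f, TVp d f := by
  intro f
  induction f with
  | zero => intro p vis ved _ hkl; omega
  | succ f ih =>
    intro p vis ved hp hkl
    cases hg : PySem.Dict.get? ved p with
    | some k => exact ⟨(k, (vis, ved)), by rw [visitA, hg]⟩
    | none =>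
      by_cases hvis : PySem.Set.contains vis p = true
      · exact ⟨(0, (vis, ved)), by rw [visitA, hg, if_pos hvis]⟩
      · have hvisf : PySem.Set.contains vis p = false := by
          cases hb : PySem.Set.contains vis p
          · rfl
          · exact absurd hb hvis
        have hlt : klD d (PySem.Set.add vis p) < f := by
          have := klD_add_lt d vis p hp hvisf
          omega
        obtain ⟨out, hout⟩ := tf_of_tv d f ih (PySem.Dict.getD d p []) 1 (PySem.Set.add vis p) ved hlt
        obtain ⟨dep, v1, w1⟩ := out
        exact ⟨(dep, (PySem.Set.discard v1 p, PySem.Dict.insert w1 p dep)),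
          by rw [visitA, hg, if_neg hvis, hout]⟩

-- ---- simulation: B's machine consumes boundedly many steps and lands where A lands ----
def SVp (d : PySem.Dict String (List String)) (f : Nat) : Prop :=
  ∀ p vis ved r st', PySem.Dict.contains d p = true →
    visitA d f p (vis, ved) = some (r, st') →
    ∃ m, 1 ≤ m ∧ m ≤ fuelE (paramP d) f ∧
      ∀ g node ps dep rest,
        runB d (g + m) ((node, p :: ps, dep) :: rest) (vis, ved) =
        runB d g ((node, ps, max dep (1 + r)) :: rest) st'

def SFp (d : PySem.Dict String (List String)) (f : Nat) : Prop :=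
  ∀ ps dep vis ved dep' st1, foldParentsA d f ps dep (vis, ved) = some (dep', st1) →
    ∃ m, m ≤ ps.length * (fuelE (paramP d) f + 1) ∧
      ∀ g node rest,
        runB d (g + m) ((node, ps, dep) :: rest) (vis, ved) =
        runB d g ((node, [], dep') :: rest) st1

lemma sf_of_sv (d : PySem.Dict String (List String)) (f : Nat) (h : SVp d f) : SFp d f := by
  intro ps
  induction ps with
  | nil =>
    intro dep vis ved dep' st1 hfa
    rw [foldParentsA] at hfa
    cases hfa
    exact ⟨0, by omega, fun g node rest => rfl⟩
  | cons p ps ih =>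
    intro dep vis ved dep' st1 hfa
    rw [foldParentsA] at hfa
    by_cases hc : PySem.Dict.contains d p = false
    · rw [if_pos hc] at hfa
      obtain ⟨m', hb', ht'⟩ := ih dep vis ved dep' st1 hfa
      refine ⟨m' + 1, ?_, ?_⟩
      · simp only [List.length_cons, Nat.succ_mul]; omega
      · intro g node rest
        show runB d ((g + m') + 1) _ _ = _
        rw [runB, if_pos hc]
        exact ht' g node rest
    · rw [if_neg hc] at hfa
      have hc' : PySem.Dict.contains d p = true := by
        cases hb : PySem.Dict.contains d p
        · exact absurd hb hc
        · rfl
      cases hv : visitA d f p (vis, ved) with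
      | none => rw [hv] at hfa; cases hfa
      | some out =>
        obtain ⟨r, v2, w2⟩ := out
        rw [hv] at hfa
        obtain ⟨mv, hv1, hvE, htv⟩ := h p vis ved r (v2, w2) hc' hv
        obtain ⟨m', hb', ht'⟩ := ih (max dep (1 + r)) v2 w2 dep' st1 hfa
        refine ⟨mv + m', ?_, ?_⟩
        · simp only [List.length_cons, Nat.succ_mul]; omega
        · intro g node rest
          have e : g + (mv + m') = (g + m') + mv := by omega
          rw [e, htv (g + m') node ps dep rest]
          exact ht' g node rest

lemma sv_all (d : PySem.Dict String (List String)) : ∀ f, SVp d f := by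
  intro f
  induction f with
  | zero => intro p vis ved r st' _ hv; rw [visitA] at hv; cases hv
  | succ f ih =>
    intro p vis ved r st' hp hv
    have hE2 : 2 ≤ fuelE (paramP d) (f + 1) := by rw [fuelE]; omega
    rw [visitA] at hv
    cases hg : PySem.Dict.get? ved p with
    | some k =>
      rw [hg] at hv
      cases hv
      refine ⟨1, by omega, by omega, ?_⟩
      intro g node ps dep rest
      show runB d (g + 1) _ _ = _
      rw [runB, if_neg (by simp [hp]), hg]
    | none =>
      rw [hg] at hv
      by_cases hvis : PySem.Set.contains vis p = true
      · rw [if_pos hvis] at hv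
        cases hv
        refine ⟨1, by omega, by omega, ?_⟩
        intro g node ps dep rest
        show runB d (g + 1) _ _ = _
        rw [runB, if_neg (by simp [hp]), hg, if_pos hvis]
      · rw [if_neg hvis] at hv
        have hvisf : PySem.Set.contains vis p = false := by
          cases hb : PySem.Set.contains vis p
          · rfl
          · exact absurd hb hvis
        cases hfold : foldParentsA d f (PySem.Dict.getD d p []) 1 (PySem.Set.add vis p, ved) with
        | none => rw [hfold] at hv; cases hv
        | some out =>
          obtain ⟨dep_p, v1, w1⟩ := out
          obtain ⟨mf, hbf, htf⟩ := sf_of_sv d f ih _ 1 (PySem.Set.add vis p) ved dep_p (v1, w1) hfold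
          have hlen : (PySem.Dict.getD d p []).length ≤ paramP d := getD_len_le_paramP d p hp
          rw [hfold] at hv
          cases hv
          refine ⟨mf + 2, by omega, ?_, ?_⟩
          · rw [fuelE]
            have : (PySem.Dict.getD d p []).length * (fuelE (paramP d) f + 1) ≤
                paramP d * (fuelE (paramP d) f + 1) :=
              Nat.mul_le_mul_right _ hlen
            omega
          · intro g node ps dep rest
            have e : g + (mf + 2) = (((g + 1) + mf) + 1) := by omega
            rw [e, runB, if_neg (by simp [hp]), hg,
              if_neg hvis, htf (g + 1) p ((node, ps, dep) :: rest)]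
            show runB d (g + 1) _ _ = _
            rw [runB]

-- ---- the per-start-node step of the two top-level folds agrees and keeps visiting empty ----
lemma step_eq (d : PySem.Dict String (List String)) (b : Int) (ved : PySem.Dict String Int)
    (k : String) (hk : PySem.Dict.contains d k = true) :
    ∃ b' ved',
      stepTopA d (PySem.Dict.size d + 1) (b, (PySem.Set.empty, ved)) k = (b', (PySem.Set.empty, ved')) ∧
      stepTopB d (fuelE (paramP d) (PySem.Dict.size d + 1)) (b, (PySem.Set.empty, ved)) k = (b', (PySem.Set.empty, ved')) := by
  cases hg : PySem.Dict.get? ved k with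
  | some v =>
    refine ⟨max b v, ved, ?_, ?_⟩
    · rw [stepTopA]
      rw [show visitA d (PySem.Dict.size d + 1) k (PySem.Set.empty, ved) = some (v, (PySem.Set.empty, ved)) from by rw [visitA, hg]]
    · rw [stepTopB]; simp only [hg]
  | none =>
    have hvisf : PySem.Set.contains PySem.Set.empty k = false := rfl
    have hlt : klD d (PySem.Set.add PySem.Set.empty k) < PySem.Dict.size d := by
      have := klD_add_lt d PySem.Set.empty k hk hvisf
      rw [klD_empty] at this
      omega
    obtain ⟨out, hfold⟩ := tf_of_tv d (PySem.Dict.size d) (tv_all d (PySem.Dict.size d))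
      (PySem.Dict.getD d k []) 1 (PySem.Set.add PySem.Set.empty k) ved hlt
    obtain ⟨dep', v1, w1⟩ := out
    have hv1 : v1 = PySem.Set.add PySem.Set.empty k :=
      rf_of_rv d (PySem.Dict.size d) (rv_all d (PySem.Dict.size d)) _ 1 _ ved dep' v1 w1 hfold
    have hdiscard : PySem.Set.discard v1 k = PySem.Set.empty := by
      rw [hv1]; exact set_discard_add PySem.Set.empty k hvisf
    -- A's step
    have hA : stepTopA d (PySem.Dict.size d + 1) (b, (PySem.Set.empty, ved)) k
        = (max b dep', (PySem.Set.empty, PySem.Dict.insert w1 k dep')) := by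
      rw [stepTopA]
      rw [show visitA d (PySem.Dict.size d + 1) k (PySem.Set.empty, ved)
            = some (dep', (PySem.Set.discard v1 k, PySem.Dict.insert w1 k dep')) from by
        rw [visitA, hg, if_neg (by simp), hfold]]
      rw [hdiscard]
    -- B's step
    obtain ⟨m, hbm, htm⟩ := sf_of_sv d (PySem.Dict.size d) (sv_all d (PySem.Dict.size d))
      (PySem.Dict.getD d k []) 1 (PySem.Set.add PySem.Set.empty k) ved dep' (v1, w1) hfold
    have hlen : (PySem.Dict.getD d k []).length ≤ paramP d := getD_len_le_paramP d k hk
    have hmle : m ≤ paramP d * (fuelE (paramP d) (PySem.Dict.size d) + 1) := by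
      have : (PySem.Dict.getD d k []).length * (fuelE (paramP d) (PySem.Dict.size d) + 1) ≤
          paramP d * (fuelE (paramP d) (PySem.Dict.size d) + 1) := Nat.mul_le_mul_right _ hlen
      omega
    have hfuel : m + 2 ≤ fuelE (paramP d) (PySem.Dict.size d + 1) := by
      rw [fuelE]; omega
    have hB : stepTopB d (fuelE (paramP d) (PySem.Dict.size d + 1)) (b, (PySem.Set.empty, ved)) k
        = (max b dep', (PySem.Set.empty, PySem.Dict.insert w1 k dep')) := by
      rw [stepTopB]
      simp only [hg]
      have e : fuelE (paramP d) (PySem.Dict.size d + 1)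
          = ((fuelE (paramP d) (PySem.Dict.size d + 1) - m - 1) + 1) + m := by omega
      rw [e, htm _ k [], runB, hdiscard]
    exact ⟨max b dep', PySem.Dict.insert w1 k dep', hA, hB⟩

lemma top_eq (d : PySem.Dict String (List String)) :
    ∀ (ks : List String) (b : Int) (ved : PySem.Dict String Int),
      (∀ k ∈ ks, PySem.Dict.contains d k = true) →
      ks.foldl (stepTopA d (PySem.Dict.size d + 1)) (b, (PySem.Set.empty, ved)) =
      ks.foldl (stepTopB d (fuelE (paramP d) (PySem.Dict.size d + 1))) (b, (PySem.Set.empty, ved)) := by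
  intro ks
  induction ks with
  | nil => intro b ved _; rfl
  | cons k ks ih =>
    intro b ved hks
    obtain ⟨b', ved', hA, hB⟩ := step_eq d b ved k (hks k (by simp))
    rw [List.foldl_cons, List.foldl_cons, hA, hB]
    exact ih b' ved' (fun x hx => hks x (by simp [hx]))

-- ===== VERDICT (by name: the statement is the Claim_ definition above) =====
theorem compute_depth_py_spec : Claim_equal_compute_depth_py := by
  intro deps errors _
  unfold Spec_compute_depth_py compute_depth_py compute_depth_py_alt
  dsimp only
  rw [top_eq (PySem.Dict.ofList deps) _ 0 PySem.Dict.empty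
    (fun k hk => (PySem.Dict.contains_iff_mem_keys _ k).2 hk)]
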